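-- pv_equiv track=rewrite | github.com/kashish-ag/365DaysOfCode | Day13/Ques5.py | countGoodRectangles
-- ===== SOURCE A (Python) =====
-- from typing import List
--
-- def countGoodRectangles(rectangles: List[List[int]]) -> int:
--     l=[]
--     for i in rectangles:
--         m=min(i)
--         l.append(m)
--     length=max(l)
--     count=0
--     for i in l:
--         if(i==length):
--             count+=1
--     return count
-- ===== SOURCE B (Python) =====
-- from typing import List
--
-- def countGoodRectangles(rectangles: List[List[int]]) -> int:
--     best = None
--     count = 0
--     for r in rectangles:
--         m = min(r)
--         if best is None or m > best:
--             best, count = m, 1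
--         elif m == best:
--             count += 1
--     return count
-- ===== Notes on version B (the rewrite author's own statement) =====
-- stated objective: simpler
-- what changed: Replaces A's build-list-of-mins + max() + second counting pass with a single fused pass maintaining the running best minimal side and its count.
-- outside the precondition, e.g. on countGoodRectangles([]): A raises ValueError, B returns 0
import Mathlib
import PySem

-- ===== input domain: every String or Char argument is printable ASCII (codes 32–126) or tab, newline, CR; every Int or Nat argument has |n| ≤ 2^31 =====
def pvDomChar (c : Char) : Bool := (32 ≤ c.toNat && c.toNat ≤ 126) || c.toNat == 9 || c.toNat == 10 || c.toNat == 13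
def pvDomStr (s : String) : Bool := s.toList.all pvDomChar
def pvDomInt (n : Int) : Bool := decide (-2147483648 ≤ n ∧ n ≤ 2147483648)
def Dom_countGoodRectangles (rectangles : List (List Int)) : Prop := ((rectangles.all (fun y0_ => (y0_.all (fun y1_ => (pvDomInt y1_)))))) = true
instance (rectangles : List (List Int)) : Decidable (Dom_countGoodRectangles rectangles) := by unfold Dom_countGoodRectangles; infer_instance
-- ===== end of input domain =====

-- B fuses A's three passes (collect mins, take max, count max) into one pass keeping a running best and count; return value only.


-- ===== PORT A =====
def countGoodRectangles (rectangles : List (List Int)) : Int :=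
  let l := rectangles.foldl (fun acc i => acc ++ [(PySem.List.min? i (fun x => x)).getD 0]) []
  let length := (PySem.List.max? l (fun x => x)).getD 0
  l.foldl (fun count i => if i == length then count + 1 else count) 0

-- ===== PORT B =====
def countGoodRectangles_alt (rectangles : List (List Int)) : Int :=
  (rectangles.foldl (fun (s : Option Int × Int) r =>
      let m := (PySem.List.min? r (fun x => x)).getD 0
      match s.1 with
      | none => (some m, 1)
      | some b => if b < m then (some m, 1) else if m = b then (some b, s.2 + 1) else s)
    (none, 0)).2

-- ===== PRECONDITION & SPEC =====
-- Pre_ excludes exactly the inputs where A raises ValueError: the empty list (max([])) and any empty rectangle (min([])).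
def Pre_countGoodRectangles (rectangles : List (List Int)) : Prop :=
  rectangles ≠ [] ∧ ∀ r ∈ rectangles, r ≠ []
instance (rectangles : List (List Int)) : Decidable (Pre_countGoodRectangles rectangles) := by unfold Pre_countGoodRectangles; infer_instance
def pvWitness_countGoodRectangles : List (List Int) := [[3, 5], [2, 2], [1, 9]]

def Spec_countGoodRectangles (rectangles : List (List Int)) (out : Int) : Prop := out = countGoodRectangles_alt rectangles
instance (rectangles : List (List Int)) (out : Int) : Decidable (Spec_countGoodRectangles rectangles out) := by unfold Spec_countGoodRectangles; infer_instance

-- ===== CLAIM (what is proved, stated in full; the proofs are below) =====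
def Claim_equal_countGoodRectangles : Prop := ∀ (rectangles : List (List Int)), Dom_countGoodRectangles rectangles → Pre_countGoodRectangles rectangles → Spec_countGoodRectangles rectangles (countGoodRectangles rectangles)

-- ===== LEMMAS AND PROOFS =====

-- the minimal side of one rectangle, as both ports compute it
def pvMin (r : List Int) : Int := (PySem.List.min? r (fun x => x)).getD 0

-- B's loop body, acting on the already-computed min
def pvStep (s : Option Int × Int) (m : Int) : Option Int × Int :=
  match s.1 with
  | none => (some m, 1)
  | some b => if b < m then (some m, 1) else if m = b then (some b, s.2 + 1) else s

-- running B's loop from a 'some' state: final best is the running max, count counts its occurrences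
theorem pvStep_foldl (ms : List Int) : ∀ (b c : Int),
    ms.foldl pvStep (some b, c)
      = (some (ms.foldl max b),
         (if ms.foldl max b = b then c else 0) + (ms.count (ms.foldl max b) : Int)) := by
  induction ms with
  | nil => intro b c; simp
  | cons m rest ih =>
    intro b c
    have hb : b ≤ rest.foldl max b := (PySem.List.le_foldl_max rest b).1
    simp only [List.foldl_cons]
    by_cases h1 : b < m
    · have hmax : max b m = m := by omega
      rw [show pvStep (some b, c) m = (some m, 1) by simp [pvStep, h1], ih]
      simp only [hmax]
      have hm : m ≤ rest.foldl max m := (PySem.List.le_foldl_max rest m).1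
      have hne : rest.foldl max m ≠ b := by omega
      simp [hne, List.count_cons]
      by_cases h2 : m = rest.foldl max m
      · simp [h2.symm]; ring
      · have h2' : ¬ ((rest.foldl max m) = m) := fun e => h2 e.symm
        simp [h2, h2']
    · have hmax : max b m = b := by omega
      by_cases h2 : m = b
      · rw [show pvStep (some b, c) m = (some b, c + 1) by simp [pvStep, h2], ih]
        simp only [hmax]
        by_cases h3 : rest.foldl max b = b
        · simp [h3, h2]; ring
        · have h3' : ¬ (m = rest.foldl max b) := by rw [h2]; exact fun e => h3 e.symm
          simp [h3, h3']
      · rw [show pvStep (some b, c) m = (some b, c) by simp [pvStep, h1, h2], ih]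
        simp only [hmax]
        have hne : ¬ (m = rest.foldl max b) := by omega
        simp [hne]

-- A on a nonempty list counts occurrences of the max of the mins
theorem portA_eq (r0 : List Int) (rs : List (List Int)) :
    countGoodRectangles (r0 :: rs)
      = (((pvMin r0 :: rs.map pvMin).count ((rs.map pvMin).foldl max (pvMin r0))) : Int) := by
  unfold countGoodRectangles
  rw [PySem.List.foldl_append_singleton_eq_map]
  simp only [List.nil_append, List.map_cons]
  simp only [PySem.List.max?_id_cons, Option.getD_some]
  rw [PySem.List.foldl_beq_add_one]
  simp only [Int.zero_add]
  rfl

-- B on a nonempty list computes the same count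
theorem portB_eq (r0 : List Int) (rs : List (List Int)) :
    countGoodRectangles_alt (r0 :: rs)
      = (((pvMin r0 :: rs.map pvMin).count ((rs.map pvMin).foldl max (pvMin r0))) : Int) := by
  unfold countGoodRectangles_alt
  have hbody : (fun (s : Option Int × Int) (r : List Int) =>
      let m := (PySem.List.min? r (fun x => x)).getD 0
      match s.1 with
      | none => (some m, 1)
      | some b => if b < m then (some m, 1) else if m = b then (some b, s.2 + 1) else s)
      = fun s r => pvStep s (pvMin r) := by
    funext s r; rfl
  rw [hbody]
  simp only [List.foldl_cons]
  rw [show pvStep (none, 0) (pvMin r0) = (some (pvMin r0), 1) from rfl]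
  rw [show (rs.foldl (fun s r => pvStep s (pvMin r)) (some (pvMin r0), 1))
        = ((rs.map pvMin).foldl pvStep (some (pvMin r0), 1)) by rw [List.foldl_map]]
  rw [pvStep_foldl]
  set M := (rs.map pvMin).foldl max (pvMin r0) with hM
  by_cases h : M = pvMin r0
  · simp [h]; ring
  · have h' : ¬ (pvMin r0 = M) := fun e => h e.symm
    simp [h, h']

-- ===== VERDICT (by name: the statement is the Claim_ definition above) =====
theorem countGoodRectangles_spec : Claim_equal_countGoodRectangles := by
  intro rectangles _ hpre
  unfold Spec_countGoodRectangles
  match rectangles, hpre with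
  | [], ⟨h, _⟩ => exact absurd rfl h
  | r0 :: rs, _ => rw [portA_eq, portB_eq]
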